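-- pv_equiv track=rewrite | github.com/helge9210/geeksforgeeks | pronicnumber.py | pronic_numbers
-- ===== SOURCE A (Python) =====
-- def pronic_numbers(range):
--     numbers = []
--     mul1 = 0
--     while True:
--         product = mul1*(mul1+1)
--         if product <= range:
--             numbers.append(product)
--             mul1 += 1
--         else:
--             break
--     return ' '.join([str(n) for n in numbers])
-- ===== SOURCE B (Python) =====
-- def pronic_numbers(range):
--     if range < 0:
--         return ''
--     # binary search for the largest n with n*(n+1) <= range
--     lo, hi = 0, range
--     while lo < hi:
--         mid = (lo + hi + 1) // 2
--         if mid * (mid + 1) <= range: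
--             lo = mid
--         else:
--             hi = mid - 1
--     parts = []
--     n = 0
--     while n <= lo:
--         parts.append(str(n * (n + 1)))
--         n += 1
--     return ' '.join(parts)
-- ===== Notes on version B (the rewrite author's own statement) =====
-- stated objective: alternative
-- what changed: B finds the largest n with n*(n+1) <= range by binary search instead of A's check-and-break accumulation, then emits the pronic products directly without re-testing the bound each step.
import Mathlib
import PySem

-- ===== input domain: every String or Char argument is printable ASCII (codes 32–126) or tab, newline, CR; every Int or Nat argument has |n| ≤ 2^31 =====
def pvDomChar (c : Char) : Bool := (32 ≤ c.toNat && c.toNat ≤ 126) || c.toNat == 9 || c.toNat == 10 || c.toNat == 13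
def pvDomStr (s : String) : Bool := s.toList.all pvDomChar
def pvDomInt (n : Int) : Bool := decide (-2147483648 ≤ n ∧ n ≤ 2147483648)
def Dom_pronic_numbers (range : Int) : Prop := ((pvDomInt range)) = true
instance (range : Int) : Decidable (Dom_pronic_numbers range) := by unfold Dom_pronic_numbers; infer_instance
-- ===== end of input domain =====

-- B replaces A's check-and-break accumulation by a binary search for the largest n with
-- n*(n+1) <= range, then emits the pronic products directly (alternative decomposition).
-- (The Nat fuel arguments only make the loops total; fuel is always sufficient.)

-- ===== PORT A =====
-- A's while-True loop: append mul1*(mul1+1) while it is <= range, else break.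
def pronicLoopA : Nat → Int → List Int → Int → List Int
  | 0, _, numbers, _ => numbers
  | fuel + 1, range, numbers, mul1 =>
    if mul1 * (mul1 + 1) ≤ range then
      pronicLoopA fuel range (numbers ++ [mul1 * (mul1 + 1)]) (mul1 + 1)
    else numbers

def pronic_numbers (range : Int) : String :=
  PySem.Str.join " " ((pronicLoopA (range.toNat + 2) range [] 0).map PySem.Int.toStr)

-- ===== PORT B =====
-- B's binary search: largest n in [lo, hi] with n*(n+1) <= range.
def pronicSearchB : Nat → Int → Int → Int → Int
  | 0, _, lo, _ => lo
  | fuel + 1, range, lo, hi =>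
    if lo < hi then
      let mid := PySem.Int.floordiv (lo + hi + 1) 2
      if mid * (mid + 1) ≤ range then pronicSearchB fuel range mid hi
      else pronicSearchB fuel range lo (mid - 1)
    else lo

-- B's emission loop: parts.append(str(n*(n+1))) for n = 0..lo.
def pronicBuildB : Nat → Int → List String → Int → List String
  | 0, _, parts, _ => parts
  | fuel + 1, lo, parts, n =>
    if n ≤ lo then pronicBuildB fuel lo (parts ++ [PySem.Int.toStr (n * (n + 1))]) (n + 1)
    else parts

def pronic_numbers_alt (range : Int) : String :=
  if range < 0 then ""
  else
    PySem.Str.join " "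
      (pronicBuildB (range.toNat + 2) (pronicSearchB (range.toNat + 1) range 0 range) [] 0)

-- ===== PRECONDITION & SPEC =====
def Spec_pronic_numbers (range : Int) (out : String) : Prop := out = pronic_numbers_alt range
instance (range : Int) (out : String) : Decidable (Spec_pronic_numbers range out) := by unfold Spec_pronic_numbers; infer_instance

-- ===== CLAIM (what is proved, stated in full; the proofs are below) =====
def Claim_equal_pronic_numbers : Prop := ∀ (range : Int), Dom_pronic_numbers range → Spec_pronic_numbers range (pronic_numbers range)

-- ===== LEMMAS AND PROOFS =====

-- Binary-search correctness: with sufficient fuel, under the bracketing invariant the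
-- result r satisfies 0 ≤ r and r*(r+1) ≤ range < (r+1)*(r+2).
lemma pronicSearchB_correct (range : Int) :
    ∀ fuel (lo hi : Int), (hi - lo).toNat < fuel → 0 ≤ lo → lo ≤ hi →
      lo * (lo + 1) ≤ range → range < (hi + 1) * (hi + 2) →
      let r := pronicSearchB fuel range lo hi
      0 ≤ r ∧ r * (r + 1) ≤ range ∧ range < (r + 1) * (r + 2) := by
  intro fuel
  induction fuel with
  | zero => intro lo hi h; omega
  | succ fuel ih =>
    intro lo hi hk hlo0 hlohi hlo hhi
    rw [pronicSearchB]
    by_cases hlt : lo < hi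
    · simp only [hlt, if_true]
      have hmid : lo + 1 ≤ PySem.Int.floordiv (lo + hi + 1) 2 ∧
          PySem.Int.floordiv (lo + hi + 1) 2 ≤ hi := by
        rw [PySem.Int.floordiv_eq_ediv_of_pos (by omega : (0:Int) < 2)]
        omega
      set mid := PySem.Int.floordiv (lo + hi + 1) 2 with hmiddef
      by_cases hc : mid * (mid + 1) ≤ range
      · simp only [hc, if_true]
        exact ih mid hi (by omega) (by omega) (by omega) hc hhi
      · simp only [hc, if_false]
        exact ih lo (mid - 1) (by omega) hlo0 (by omega) hlo (by nlinarith)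
    · simp only [hlt, if_false]
      have : lo = hi := by omega
      subst this
      exact ⟨hlo0, hlo, hhi⟩

-- For 0 ≤ n and L the bracketed maximum: n*(n+1) ≤ range ↔ n ≤ L.
lemma cond_iff (range L n : Int) (h0L : 0 ≤ L) (hL1 : L * (L + 1) ≤ range)
    (hL2 : range < (L + 1) * (L + 2)) (h0n : 0 ≤ n) :
    n * (n + 1) ≤ range ↔ n ≤ L := by
  constructor
  · intro h
    by_contra hgt
    push Not at hgt
    nlinarith
  · intro h
    nlinarith

-- A's loop (mapped through str) coincides with B's emission loop up to L.
lemma loop_eq (range L : Int) (h0L : 0 ≤ L) (hL1 : L * (L + 1) ≤ range)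
    (hL2 : range < (L + 1) * (L + 2)) :
    ∀ fa fb (mul1 : Int) (acc : List Int),
      (range + 1 - mul1).toNat < fa → (L + 1 - mul1).toNat < fb → 0 ≤ mul1 →
      (pronicLoopA fa range acc mul1).map PySem.Int.toStr =
        pronicBuildB fb L (acc.map PySem.Int.toStr) mul1 := by
  intro fa
  induction fa with
  | zero => intro fb mul1 acc h; omega
  | succ fa ih =>
    intro fb mul1 acc ha hb h0
    cases fb with
    | zero => omega
    | succ fb =>
      rw [pronicLoopA, pronicBuildB]
      have hiff := cond_iff range L mul1 h0L hL1 hL2 h0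
      by_cases hc : mul1 * (mul1 + 1) ≤ range
      · have hle : mul1 ≤ L := hiff.mp hc
        have hm : mul1 ≤ range := by nlinarith [mul_self_nonneg mul1]
        simp only [hc, hle, if_true]
        rw [ih fb (mul1 + 1) (acc ++ [mul1 * (mul1 + 1)]) (by omega) (by omega) (by omega)]
        simp
      · have hgt : ¬ mul1 ≤ L := fun h => hc (hiff.mpr h)
        simp only [hc, hgt, if_false]

-- ===== VERDICT (by name: the statement is the Claim_ definition above) =====
theorem pronic_numbers_spec : Claim_equal_pronic_numbers := by
  intro range _
  unfold Spec_pronic_numbers pronic_numbers pronic_numbers_alt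
  by_cases hneg : range < 0
  · simp only [hneg, if_true]
    rw [pronicLoopA]
    simp only [show ¬ (0 * (0 + 1) ≤ range) by omega, if_false]
    rfl
  · simp only [hneg, if_false]
    have h0 : (0:Int) ≤ range := by omega
    obtain ⟨hr0, hr1, hr2⟩ := pronicSearchB_correct range (range.toNat + 1) 0 range
      (by omega) (le_refl 0) h0 (by omega) (by nlinarith)
    have hLr : pronicSearchB (range.toNat + 1) range 0 range ≤ range := by nlinarith
    rw [loop_eq range (pronicSearchB (range.toNat + 1) range 0 range) hr0 hr1 hr2
      (range.toNat + 2) (range.toNat + 2) 0 [] (by omega) (by omega) (le_refl 0)]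
    rfl
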